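-- pv_equiv track=rewrite | github.com/benbc/recovery | pipeline2/date_utils.py | _prefer_specific_dates
-- ===== SOURCE A (Python) =====
-- def _prefer_specific_dates(dates: list[tuple[str, str]]) -> list[tuple[str, str]]:
--     """
--     Filter out partial dates when a more specific consistent date exists.
--
--     If we have both "2004" and "2004-06-15", remove "2004" since the more
--     specific date is consistent with it and provides better information.
--
--     If we have "2004" and "2005-03-10", keep both (different years).
--     """
--     if len(dates) <= 1:
--         return dates
--
--     date_values = [d[0] for d in dates]
--     result = []
--
--     for date_value, source_type in dates:
--         # Check if there's a more specific date that this one is a prefix of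
--         is_dominated = False
--         for other in date_values:
--             if (
--                 other != date_value
--                 and len(other) > len(date_value)
--                 and other.startswith(date_value)
--             ):
--                 # This date is a prefix of a more specific date
--                 is_dominated = True
--                 break
--
--         if not is_dominated:
--             result.append((date_value, source_type))
--
--     return result
-- ===== SOURCE B (Python) =====
-- def _prefer_specific_dates(dates: list[tuple[str, str]]) -> list[tuple[str, str]]:
--     """Keep only dates whose value is not a proper prefix of another value.
--
--     Sort the distinct values; any proper prefix sorts immediately before the
--     block of its extensions, so a value is dominated exactly when the next
--     distinct value in sorted order starts with it.
--     """
--     if len(dates) <= 1: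
--         return dates
--
--     vals = sorted({value for value, _ in dates})
--     dominated = {vals[i] for i in range(len(vals) - 1) if vals[i + 1].startswith(vals[i])}
--     return [(value, source) for value, source in dates if value not in dominated]
-- ===== Notes on version B (the rewrite author's own statement) =====
-- stated objective: faster
-- what changed: Replaces the per-date scan over all other values with sorting the distinct values once and checking only each sorted neighbour pair (a value is dominated iff the next distinct value in sorted order starts with it).
import Mathlib
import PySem

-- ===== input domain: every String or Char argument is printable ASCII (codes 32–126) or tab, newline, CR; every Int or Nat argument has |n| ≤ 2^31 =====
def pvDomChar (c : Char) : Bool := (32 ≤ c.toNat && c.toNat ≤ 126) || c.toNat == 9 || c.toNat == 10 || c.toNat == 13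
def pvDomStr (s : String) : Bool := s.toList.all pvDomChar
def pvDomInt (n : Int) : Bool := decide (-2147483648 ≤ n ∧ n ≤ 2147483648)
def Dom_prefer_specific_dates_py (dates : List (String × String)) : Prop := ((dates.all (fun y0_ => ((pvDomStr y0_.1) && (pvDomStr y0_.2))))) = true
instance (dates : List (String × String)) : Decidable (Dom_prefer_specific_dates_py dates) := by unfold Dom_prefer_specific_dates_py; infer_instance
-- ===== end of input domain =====

-- B sorts the distinct date values once and checks only sorted neighbours for prefix domination (faster than A's per-date scan over all values).


-- ===== PORT A =====
def prefer_specific_dates_py (dates : List (String × String)) : List (String × String) :=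
  if dates.length ≤ 1 then dates else
  let date_values := dates.map (fun d => d.1)
  dates.foldl (fun result p =>
    let is_dominated := date_values.any (fun other =>
      other != p.1 && decide (PySem.Str.len other > PySem.Str.len p.1)
        && PySem.Str.startswith other p.1)
    if is_dominated then result else result ++ [p]) []

-- ===== PORT B =====
-- vals[i] / vals[i+1] are ported as pyGetD with default "": every index produced by the
-- range is provably in bounds, so the default is never consulted (exact).
def prefer_specific_dates_py_alt (dates : List (String × String)) : List (String × String) :=
  if dates.length ≤ 1 then dates else
  let vals := PySem.List.sorted (PySem.Set.ofList (dates.map (fun d => d.1))) (fun x => x)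
  let idxs := (PySem.List.pyRange 0 ((vals.length : Int) - 1) 1).filter
      (fun i => PySem.Str.startswith (PySem.List.pyGetD vals (i + 1) "") (PySem.List.pyGetD vals i ""))
  let dominated : PySem.Set String := PySem.Set.ofList (idxs.map (fun i => PySem.List.pyGetD vals i ""))
  dates.filter (fun p => !(PySem.Set.contains dominated p.1))

-- ===== PRECONDITION & SPEC =====
def Spec_prefer_specific_dates_py (dates : List (String × String)) (out : List (String × String)) : Prop := out = prefer_specific_dates_py_alt dates
instance (dates : List (String × String)) (out : List (String × String)) : Decidable (Spec_prefer_specific_dates_py dates out) := by unfold Spec_prefer_specific_dates_py; infer_instance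

-- ===== CLAIM (what is proved, stated in full; the proofs are below) =====
def Claim_equal_prefer_specific_dates_py : Prop := ∀ (dates : List (String × String)), Dom_prefer_specific_dates_py dates → Spec_prefer_specific_dates_py dates (prefer_specific_dates_py dates)

-- ===== LEMMAS AND PROOFS =====

-- a proper prefix is lexicographically smaller
lemma properPrefix_lt (x : List Char) : ∀ y, x <+: y → x ≠ y → x < y := by
  induction x with
  | nil =>
    intro y _ hne
    cases y with
    | nil => exact absurd rfl hne
    | cons b t => exact List.Lex.nil
  | cons a x ih =>
    intro y hp hne
    cases y with
    | nil => simp at hp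
    | cons b t =>
      rw [List.cons_prefix_cons] at hp
      obtain ⟨rfl, hp⟩ := hp
      exact List.Lex.cons (ih t hp (fun e => hne (by rw [e])))

lemma prefix_sandwich (x : List Char) : ∀ z y, ¬ z < x → ¬ y < z → x <+: y → x <+: z := by
  induction x with
  | nil => intro z y _ _ _; exact List.nil_prefix
  | cons a x ih =>
    intro z y h1 h2 hp
    cases y with
    | nil => simp at hp
    | cons b t =>
      rw [List.cons_prefix_cons] at hp
      obtain ⟨rfl, hp⟩ := hp
      cases z with
      | nil => exact absurd List.Lex.nil h1
      | cons c z' =>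
        rcases lt_trichotomy c a with hca | rfl | hac
        · exact absurd (List.Lex.rel hca) h1
        · rw [List.cons_prefix_cons]
          refine ⟨rfl, ih z' t (fun hl => h1 (List.Lex.cons hl)) (fun hl => h2 (List.Lex.cons hl)) hp⟩
        · exact absurd (List.Lex.rel hac) h2

-- membership in B's dominated set, in index form
lemma mem_dominated (vals : List String) (v : String) :
    (v ∈ PySem.Set.ofList
      (((PySem.List.pyRange 0 ((vals.length : Int) - 1) 1).filter
          (fun i => PySem.Str.startswith (PySem.List.pyGetD vals (i + 1) "") (PySem.List.pyGetD vals i ""))).map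
        (fun i => PySem.List.pyGetD vals i "")))
    ↔ ∃ i : ℕ, i + 1 < vals.length ∧ vals.getD i "" = v ∧
        (vals.getD i "").toList <+: (vals.getD (i + 1) "").toList := by
  rw [PySem.Set.mem_ofList]
  simp only [List.mem_map, List.mem_filter, PySem.List.mem_pyRange_one]
  constructor
  · rintro ⟨i, ⟨⟨h0, h1⟩, hsw⟩, rfl⟩
    have e1 : PySem.List.pyGetD vals i "" = vals.getD i.toNat "" := by
      rw [← PySem.List.pyGetD_natCast vals i.toNat, Int.toNat_of_nonneg h0]
    have e2 : PySem.List.pyGetD vals (i + 1) "" = vals.getD (i.toNat + 1) "" := by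
      rw [← PySem.List.pyGetD_natCast vals (i.toNat + 1)]
      congr 1
      omega
    rw [e1, e2] at hsw
    rw [PySem.Str.startswith_eq] at hsw
    exact ⟨i.toNat, by omega, e1.symm, (PySem.Chars.startswith_iff _ _).mp hsw⟩
  · rintro ⟨i, hi, hvi, hpre⟩
    refine ⟨(i : Int), ⟨⟨Int.natCast_nonneg i, by omega⟩, ?_⟩, ?_⟩
    · have e2 : ((i : Int) + 1) = ((i + 1 : ℕ) : Int) := by omega
      rw [e2, PySem.List.pyGetD_natCast, PySem.List.pyGetD_natCast,
        PySem.Str.startswith_eq]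
      exact (PySem.Chars.startswith_iff _ _).mpr hpre
    · rw [PySem.List.pyGetD_natCast]
      exact hvi

lemma dominated_iff_succ (vals : List String) (hpw : vals.Pairwise (· < ·))
    (v : String) (hv : v ∈ vals) :
    (∃ y ∈ vals, y ≠ v ∧ v.toList.length < y.toList.length ∧ v.toList <+: y.toList)
    ↔ ∃ i : ℕ, i + 1 < vals.length ∧ vals.getD i "" = v ∧
        (vals.getD i "").toList <+: (vals.getD (i + 1) "").toList := by
  have hpw' := List.pairwise_iff_getElem.mp hpw
  constructor
  · rintro ⟨y, hy, hne, hlen, hpre⟩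
    obtain ⟨i, hi, hvi⟩ := List.mem_iff_getElem.mp hv
    obtain ⟨j, hj, hyj⟩ := List.mem_iff_getElem.mp hy
    have hvy : v < y := by
      rw [String.lt_iff_toList_lt]
      exact properPrefix_lt _ _ hpre (fun e => hne (String.toList_inj.mp e.symm))
    have hij : i < j := by
      rcases lt_trichotomy i j with h | rfl | h
      · exact h
      · exact absurd (hvi ▸ hyj ▸ rfl : y = v) hne
      · exact absurd hvy (lt_asymm (hvi ▸ hyj ▸ hpw' j i hj hi h))
    have hi1 : i + 1 < vals.length := by omega
    have hnext : v < vals[i + 1] := hvi ▸ hpw' i (i + 1) hi hi1 (by omega)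
    have hup : ¬ (y.toList < vals[i + 1].toList) := by
      rcases eq_or_lt_of_le (Nat.succ_le_of_lt hij) with h | h
      · intro hc
        rw [← String.lt_iff_toList_lt] at hc
        subst h
        rw [hyj] at hc
        exact lt_irrefl _ hc
      · intro hc
        rw [← String.lt_iff_toList_lt] at hc
        exact lt_asymm (hyj ▸ hpw' (i + 1) j hi1 hj h) hc
    have hsand := prefix_sandwich v.toList vals[i + 1].toList y.toList
      (fun hc => lt_asymm (String.lt_iff_toList_lt.mp hnext) hc) hup hpre
    refine ⟨i, hi1, ?_, ?_⟩
    · rw [List.getD_eq_getElem _ _ hi]; exact hvi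
    · rw [List.getD_eq_getElem _ _ hi, List.getD_eq_getElem _ _ hi1, hvi]
      exact hsand
  · rintro ⟨i, hi1, hvi, hpre⟩
    have hi : i < vals.length := by omega
    rw [List.getD_eq_getElem _ _ hi] at hvi
    rw [List.getD_eq_getElem _ _ hi, List.getD_eq_getElem _ _ hi1, hvi] at hpre
    have hlt : v < vals[i + 1] := hvi ▸ hpw' i (i + 1) hi hi1 (by omega)
    have hne : vals[i + 1] ≠ v := fun e => lt_irrefl _ (e ▸ hlt)
    refine ⟨vals[i + 1], List.getElem_mem hi1, hne, ?_, hpre⟩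
    rcases hpre with ⟨t, ht⟩
    rcases t with _ | ⟨c, t⟩
    · exact absurd (String.toList_inj.mp (by rw [← ht]; simp)) (Ne.symm hne)
    · rw [← ht]; simp

lemma dominated_eq (dates : List (String × String)) (v : String) (hv : v ∈ dates.map (fun d => d.1)) :
    ((dates.map (fun d => d.1)).any (fun other =>
      other != v && decide (PySem.Str.len other > PySem.Str.len v)
        && PySem.Str.startswith other v))
    = PySem.Set.contains
        (PySem.Set.ofList
          (((PySem.List.pyRange 0 (((PySem.List.sorted (PySem.Set.ofList (dates.map (fun d => d.1))) (fun x => x)).length : Int) - 1) 1).filter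
              (fun i => PySem.Str.startswith
                (PySem.List.pyGetD (PySem.List.sorted (PySem.Set.ofList (dates.map (fun d => d.1))) (fun x => x)) (i + 1) "")
                (PySem.List.pyGetD (PySem.List.sorted (PySem.Set.ofList (dates.map (fun d => d.1))) (fun x => x)) i ""))).map
            (fun i => PySem.List.pyGetD (PySem.List.sorted (PySem.Set.ofList (dates.map (fun d => d.1))) (fun x => x)) i "")))
        v := by
  have hmem : ∀ y : String,
      (y ∈ PySem.List.sorted (PySem.Set.ofList (dates.map (fun d => d.1))) (fun x => x))
      ↔ y ∈ dates.map (fun d => d.1) := by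
    intro y
    rw [(PySem.List.sorted_perm (PySem.Set.ofList (dates.map (fun d => d.1))) (fun x => x) false).mem_iff]
    exact PySem.Set.mem_ofList _ _
  rw [Bool.eq_iff_iff]
  have hc : (PySem.Set.contains
        (PySem.Set.ofList
          (((PySem.List.pyRange 0 (((PySem.List.sorted (PySem.Set.ofList (dates.map (fun d => d.1))) (fun x => x)).length : Int) - 1) 1).filter
              (fun i => PySem.Str.startswith
                (PySem.List.pyGetD (PySem.List.sorted (PySem.Set.ofList (dates.map (fun d => d.1))) (fun x => x)) (i + 1) "")
                (PySem.List.pyGetD (PySem.List.sorted (PySem.Set.ofList (dates.map (fun d => d.1))) (fun x => x)) i ""))).map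
            (fun i => PySem.List.pyGetD (PySem.List.sorted (PySem.Set.ofList (dates.map (fun d => d.1))) (fun x => x)) i "")))
        v = true)
      ↔ (v ∈ PySem.Set.ofList
          (((PySem.List.pyRange 0 (((PySem.List.sorted (PySem.Set.ofList (dates.map (fun d => d.1))) (fun x => x)).length : Int) - 1) 1).filter
              (fun i => PySem.Str.startswith
                (PySem.List.pyGetD (PySem.List.sorted (PySem.Set.ofList (dates.map (fun d => d.1))) (fun x => x)) (i + 1) "")
                (PySem.List.pyGetD (PySem.List.sorted (PySem.Set.ofList (dates.map (fun d => d.1))) (fun x => x)) i ""))).map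
            (fun i => PySem.List.pyGetD (PySem.List.sorted (PySem.Set.ofList (dates.map (fun d => d.1))) (fun x => x)) i ""))) := by
    simp [PySem.Set.contains]
  rw [hc, mem_dominated,
    ← dominated_iff_succ _ (PySem.List.sorted_ofList_pairwise_lt (dates.map (fun d => d.1)))
      v ((hmem v).mpr hv)]
  simp only [List.any_eq_true, Bool.and_eq_true, bne_iff_ne, decide_eq_true_eq,
    PySem.Str.startswith_eq]
  constructor
  · rintro ⟨y, hy, ⟨hne, hgt⟩, hsw⟩
    have hlen : v.toList.length < y.toList.length := by
      have h1 : PySem.Str.len y = y.toList.length := by simp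
      have h2 : PySem.Str.len v = v.toList.length := by simp
      omega
    exact ⟨y, (hmem y).mpr hy, hne, hlen, (PySem.Chars.startswith_iff _ _).mp hsw⟩
  · rintro ⟨y, hy, hne, hlen, hpre⟩
    refine ⟨y, (hmem y).mp hy, ⟨hne, ?_⟩, (PySem.Chars.startswith_iff _ _).mpr hpre⟩
    have h1 : PySem.Str.len y = y.toList.length := by simp
    have h2 : PySem.Str.len v = v.toList.length := by simp
    omega

-- the 'if dominated: skip else append' loop of A is a filter
lemma foldl_skip_if {α : Type} (l : List α) (q : α → Bool) (acc : List α) :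
    l.foldl (fun r x => if q x then r else r ++ [x]) acc = acc ++ l.filter (fun x => !q x) := by
  induction l generalizing acc with
  | nil => simp
  | cons a t ih => cases h : q a <;> simp [List.foldl_cons, h, ih]

-- ===== VERDICT (by name: the statement is the Claim_ definition above) =====
theorem prefer_specific_dates_py_spec : Claim_equal_prefer_specific_dates_py := by
  intro dates _
  unfold Spec_prefer_specific_dates_py prefer_specific_dates_py prefer_specific_dates_py_alt
  by_cases h : dates.length ≤ 1
  · simp [h]
  · simp only [h, if_false]
    rw [foldl_skip_if, List.nil_append]
    apply List.filter_congr
    intro p hp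
    rw [dominated_eq dates p.1 (List.mem_map_of_mem hp)]
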